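-- pv_equiv track=rewrite | github.com/HemadarshiniS220801079/QUESTIONS | count_elements.py | countResponseTimeRegressions
-- ===== SOURCE A (Python) =====
-- def countResponseTimeRegressions(responseTimes):
--     # Write your code here
--     total = 0
--     count = 0
--
--     for i in range(len(responseTimes)):
--         if i == 0:
--             total += responseTimes[i]
--             continue
--
--         if responseTimes[i] * i > total:
--             count += 1
--
--         total += responseTimes[i]
--
--     return count
-- ===== SOURCE B (Python) =====
-- def countResponseTimeRegressions(responseTimes):
--     # Brute force over pairs: index i regresses iff the total deviation of
--     # responseTimes[i] from all earlier elements is positive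
--     # (sum(x - y for y in earlier) > 0 is exactly x*i > sum(earlier), in integers).
--     return sum(1 for i, x in enumerate(responseTimes)
--                if i > 0 and sum(x - y for y in responseTimes[:i]) > 0)
-- ===== Notes on version B (the rewrite author's own statement) =====
-- stated objective: alternative
-- what changed: Replaces A's single pass with a running total and counter by a brute-force pairwise scan: for each index i it rescans all earlier elements and counts i where the summed deviation sum(x - y for y in responseTimes[:i]) is positive, maintaining no running state at all.
import Mathlib
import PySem

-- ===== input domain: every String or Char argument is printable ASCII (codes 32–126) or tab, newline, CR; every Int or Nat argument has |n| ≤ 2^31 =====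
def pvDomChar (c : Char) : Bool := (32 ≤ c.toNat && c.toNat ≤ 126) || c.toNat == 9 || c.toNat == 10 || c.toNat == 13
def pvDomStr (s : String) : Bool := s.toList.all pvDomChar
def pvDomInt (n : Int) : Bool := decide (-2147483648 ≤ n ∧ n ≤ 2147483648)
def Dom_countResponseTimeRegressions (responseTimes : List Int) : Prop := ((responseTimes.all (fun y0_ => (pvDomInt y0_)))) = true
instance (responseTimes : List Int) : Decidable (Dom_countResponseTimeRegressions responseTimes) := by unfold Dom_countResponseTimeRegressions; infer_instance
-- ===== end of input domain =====

-- B replaces A's running-total single pass by a brute-force pairwise scan: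
-- for each index i it rescans all earlier elements and counts i where the summed
-- deviation sum(x - y for y earlier) is positive (alternative decomposition, not faster).


-- ===== PORT A =====
-- literal port of A: one pass over range(len), state (total, count), i == 0 handled specially
def countResponseTimeRegressions (responseTimes : List Int) : Int :=
  ((PySem.List.pyRange 0 responseTimes.length 1).foldl
    (fun (s : Int × Int) i =>
      if i == 0 then (s.1 + PySem.List.pyGetD responseTimes i 0, s.2)
      else
        let c := if PySem.List.pyGetD responseTimes i 0 * i > s.1 then s.2 + 1 else s.2
        (s.1 + PySem.List.pyGetD responseTimes i 0, c))
    (0, 0)).2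

-- ===== PORT B =====
-- port of B: count (i, x) in enumerate where i > 0 and the deviation sum over the
-- slice responseTimes[:i] is positive
def countResponseTimeRegressions_alt (responseTimes : List Int) : Int :=
  ((PySem.List.enumerate responseTimes 0).countP
    (fun p => decide (0 < p.1 ∧
      0 < ((PySem.List.slice responseTimes none (some p.1)).map (fun y => p.2 - y)).sum)) : Nat)

-- ===== PRECONDITION & SPEC =====
def Spec_countResponseTimeRegressions (responseTimes : List Int) (out : Int) : Prop := out = countResponseTimeRegressions_alt responseTimes
instance (responseTimes : List Int) (out : Int) : Decidable (Spec_countResponseTimeRegressions responseTimes out) := by unfold Spec_countResponseTimeRegressions; infer_instance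

-- ===== CLAIM (what is proved, stated in full; the proofs are below) =====
def Claim_equal_countResponseTimeRegressions : Prop := ∀ (responseTimes : List Int), Dom_countResponseTimeRegressions responseTimes → Spec_countResponseTimeRegressions responseTimes (countResponseTimeRegressions responseTimes)

-- ===== LEMMAS AND PROOFS =====

/-- Common recursive specification: walk the list with index `k`, running prior-sum `t`,
counter `c`; count positions with `x * k > t`. -/
def specGo : List Int → Int → Int → Int → Int
  | [], _, _, c => c
  | x :: r, k, t, c => specGo r (k + 1) (t + x) (if x * k > t then c + 1 else c)

/-- A's loop body on (index, value) pairs. -/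
def gA (s p : Int × Int) : Int × Int :=
  if p.1 == 0 then (s.1 + p.2, s.2)
  else
    let c := if p.2 * p.1 > s.1 then s.2 + 1 else s.2
    (s.1 + p.2, c)

theorem specGo_append : ∀ (xs : List Int) (y k t c : Int),
    specGo (xs ++ [y]) k t c =
      if y * (k + xs.length) > t + xs.sum then specGo xs k t c + 1 else specGo xs k t c := by
  intro xs
  induction xs with
  | nil => intro y k t c; simp [specGo]
  | cons x r ih =>
    intro y k t c
    simp only [List.cons_append, specGo]
    rw [ih]
    have h1 : k + 1 + (r.length : Int) = k + ((x :: r).length : Int) := by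
      push_cast [List.length_cons]; ring
    have h2 : t + x + r.sum = t + (x :: r).sum := by rw [List.sum_cons]; ring
    rw [h1, h2]

/-- A's fold over the tail (indices ≥ 1) computes `specGo`. -/
theorem foldA_go : ∀ (xs : List Int) (k t c : Int), 1 ≤ k →
    (PySem.List.enumerate xs k).foldl gA (t, c) = (t + xs.sum, specGo xs k t c) := by
  intro xs
  induction xs with
  | nil => intro k t c hk; simp [PySem.List.enumerate_nil, specGo]
  | cons x r ih =>
    intro k t c hk
    rw [PySem.List.enumerate_cons]
    simp only [List.foldl_cons]
    have hk0 : (k == 0) = false := by simp; omega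
    simp only [gA, hk0, Bool.false_eq_true, if_false]
    rw [ih (k + 1) (t + x) _ (by omega)]
    simp only [specGo, List.sum_cons, Prod.mk.injEq]
    exact ⟨by ring, trivial⟩

/-- A equals the common recursive specification. -/
theorem A_eq_spec (xs : List Int) : countResponseTimeRegressions xs = specGo xs 0 0 0 := by
  unfold countResponseTimeRegressions
  show ((PySem.List.pyRange 0 (xs.length : Int) 1).foldl
      (fun acc j => gA acc (j, PySem.List.pyGetD xs j 0)) (0, 0)).2 = specGo xs 0 0 0
  have h1 : (PySem.List.pyRange 0 (xs.length : Int) 1).foldl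
      (fun acc j => gA acc (j, PySem.List.pyGetD xs j 0)) ((0 : Int), (0 : Int))
      = (PySem.List.enumerate xs 0).foldl gA (0, 0) := by
    have he := PySem.List.enumerate_eq_map_pyRange xs (0 : Int)
    rw [PySem.List.len_eq] at he
    rw [he, List.foldl_map]
  rw [h1]
  cases xs with
  | nil => simp [PySem.List.enumerate_nil, specGo]
  | cons x r =>
    rw [PySem.List.enumerate_cons]
    simp only [List.foldl_cons, gA]
    norm_num
    rw [foldA_go r 1 x 0 (by omega)]
    simp [specGo]

/-- Sum of deviations: `∑ (y - t) over ts = y * |ts| - ts.sum`. -/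
theorem sum_map_dev : ∀ (ts : List Int) (y : Int),
    (ts.map (fun t => y - t)).sum = y * ts.length - ts.sum := by
  intro ts
  induction ts with
  | nil => intro y; simp
  | cons t r ih =>
    intro y
    simp only [List.map_cons, List.sum_cons, List.length_cons, ih]
    push_cast; ring

/-- B equals the common recursive specification. -/
theorem B_eq_spec (xs : List Int) : countResponseTimeRegressions_alt xs = specGo xs 0 0 0 := by
  induction xs using List.reverseRecOn with
  | nil =>
    simp [countResponseTimeRegressions_alt, PySem.List.enumerate_nil, specGo]
  | append_singleton zs y ih =>
    unfold countResponseTimeRegressions_alt at ih ⊢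
    rw [PySem.List.enumerate_append, List.countP_append, specGo_append]
    have hcongr : (PySem.List.enumerate zs 0).countP
        (fun p => decide (0 < p.1 ∧
          0 < ((PySem.List.slice (zs ++ [y]) none (some p.1)).map (fun t => p.2 - t)).sum))
        = (PySem.List.enumerate zs 0).countP
        (fun p => decide (0 < p.1 ∧
          0 < ((PySem.List.slice zs none (some p.1)).map (fun t => p.2 - t)).sum)) := by
      apply List.countP_congr
      intro p hp
      obtain ⟨k, hk, rfl⟩ := (PySem.List.mem_enumerate_iff _ _ _).1 hp
      simp only [zero_add, decide_eq_true_eq]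
      rw [PySem.List.slice_to_natCast, PySem.List.slice_to_natCast,
          List.take_append_of_le_length (le_of_lt hk)]
    rw [hcongr]
    have hsingle : PySem.List.enumerate [y] ((0 : Int) + zs.length)
        = [((zs.length : Int), y)] := by
      rw [PySem.List.enumerate_cons, PySem.List.enumerate_nil]; norm_num
    rw [hsingle]
    have hslice : PySem.List.slice (zs ++ [y]) none (some (zs.length : Int)) = zs := by
      rw [PySem.List.slice_to_natCast]
      simp
    simp only [List.countP_cons, List.countP_nil, Nat.zero_add, hslice]
    rw [sum_map_dev zs y]
    push_cast
    rw [ih]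
    rcases Nat.eq_zero_or_pos zs.length with h0 | h0
    · have hz : zs = [] := List.length_eq_zero_iff.mp h0
      subst hz; simp [specGo]
    · have h0' : (0 : Int) < (zs.length : Int) := by exact_mod_cast h0
      simp only [zero_add, decide_eq_true_eq]
      generalize specGo zs 0 0 0 = c
      split_ifs with h1 h2 <;> omega

-- ===== VERDICT (by name: the statement is the Claim_ definition above) =====
theorem countResponseTimeRegressions_spec : Claim_equal_countResponseTimeRegressions := by
  intro xs _
  unfold Spec_countResponseTimeRegressions
  rw [A_eq_spec, B_eq_spec]
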